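-- pv_equiv track=rewrite | github.com/hwang1996/Meta-Concepts-for-Video-Captioning | msr-vtt/captioning/misc/utils.py | array_to_str
-- ===== SOURCE A (Python) =====
-- def array_to_str(arr, use_eos=0):
--     out = ''
--     for i in range(len(arr)):
--         if use_eos == 0 and arr[i] == 0:
--             break
--
--         # skip the <bos> token
--         if arr[i] == 1:
--             continue
--
--         out += str(arr[i]) + ' '
--
--         # return if encouters the <eos> token
--         # this will also guarantees that the first <eos> will be rewarded
--         if arr[i] == 0:
--             break
--
--     return out.strip()
-- ===== SOURCE B (Python) =====
-- def array_to_str(arr, use_eos=0):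
--     # cutoff pass: index of first EOS (0), defaulting to len(arr)
--     end = len(arr)
--     for i, x in enumerate(arr):
--         if x == 0:
--             end = i
--             break
--     seg = arr[:end] if use_eos == 0 else arr[:end + 1]
--     return ' '.join(str(x) for x in seg if x != 1)
-- ===== Notes on version B (the rewrite author's own statement) =====
-- stated objective: simpler
-- what changed: Replaces A's single break-driven loop that interleaves EOS detection, <bos> skipping and string concatenation with three separate steps: find the first-EOS cutoff index, slice the array there (inclusive when use_eos != 0), and ' '.join the stringified non-<bos> tokens, removing the manual 'out += ... ; strip()' string building.
import Mathlib
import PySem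

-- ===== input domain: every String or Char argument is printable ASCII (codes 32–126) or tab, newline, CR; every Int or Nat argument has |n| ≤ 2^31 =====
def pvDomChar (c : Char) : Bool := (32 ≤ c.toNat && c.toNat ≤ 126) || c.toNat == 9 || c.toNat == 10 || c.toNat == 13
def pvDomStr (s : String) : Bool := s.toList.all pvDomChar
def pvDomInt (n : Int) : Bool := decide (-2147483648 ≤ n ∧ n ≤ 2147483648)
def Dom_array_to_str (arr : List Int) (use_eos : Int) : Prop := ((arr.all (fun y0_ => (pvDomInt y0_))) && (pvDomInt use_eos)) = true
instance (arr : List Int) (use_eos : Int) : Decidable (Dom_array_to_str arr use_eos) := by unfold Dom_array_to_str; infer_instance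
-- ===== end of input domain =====

-- B replaces A's single break-driven accumulation loop by a first-EOS cutoff, a slice and a join (simpler); return value equivalence, no side effects involved.

-- ===== PORT A =====
-- A's for-loop over arr with break/continue, accumulating 'out'; the Python str is ported as List Char.
def pvALoop (use_eos : Int) : List Int → List Char → List Char
  | [], out => out
  | x :: rest, out =>
    if use_eos == 0 && x == 0 then out
    else if x == 1 then pvALoop use_eos rest out
    else
      let out' := out ++ PySem.Int.toChars x ++ [' ']
      if x == 0 then out' else pvALoop use_eos rest out'

def array_to_str (arr : List Int) (use_eos : Int) : String :=
  String.ofList (PySem.Chars.strip (pvALoop use_eos arr []))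

-- ===== PORT B =====
-- Source B's first pass: index of the first 0, defaulting to len(arr)
def pvFirstZero : List Int → Nat
  | [] => 0
  | x :: rest => if x == 0 then 0 else pvFirstZero rest + 1

def array_to_str_alt (arr : List Int) (use_eos : Int) : String :=
  let e : Int := (pvFirstZero arr : Int)
  let seg := if use_eos == 0 then PySem.List.slice arr none (some e)
             else PySem.List.slice arr none (some (e + 1))
  PySem.Str.join " " ((seg.filter (fun x => x != 1)).map PySem.Int.toStr)

-- ===== PRECONDITION & SPEC =====
def Spec_array_to_str (arr : List Int) (use_eos : Int) (out : String) : Prop := out = array_to_str_alt arr use_eos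
instance (arr : List Int) (use_eos : Int) (out : String) : Decidable (Spec_array_to_str arr use_eos out) := by unfold Spec_array_to_str; infer_instance

-- ===== CLAIM (what is proved, stated in full; the proofs are below) =====
def Claim_equal_array_to_str : Prop := ∀ (arr : List Int) (use_eos : Int), Dom_array_to_str arr use_eos → Spec_array_to_str arr use_eos (array_to_str arr use_eos)

-- ===== LEMMAS AND PROOFS =====

-- the segment A effectively emits (before filtering out 1s)
def pvSeg (use_eos : Int) (arr : List Int) : List Int :=
  if use_eos == 0 then arr.take (pvFirstZero arr) else arr.take (pvFirstZero arr + 1)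

-- tokens-with-trailing-space concatenation, the shape of A's accumulator
def pvF (ts : List (List Char)) : List Char := (ts.map (· ++ [' '])).flatten

theorem pvFirstZero_cons (x : Int) (rest : List Int) (hx : x ≠ 0) :
    pvFirstZero (x :: rest) = pvFirstZero rest + 1 := by
  simp [pvFirstZero, hx]

theorem pvSeg_cons (u x : Int) (rest : List Int) (hx : x ≠ 0) :
    pvSeg u (x :: rest) = x :: pvSeg u rest := by
  unfold pvSeg
  rw [pvFirstZero_cons x rest hx]
  by_cases hu : u = 0
  · simp [hu, List.take_succ_cons]
  · simp [hu, List.take_succ_cons]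

theorem pvF_cons (t : List Char) (ts : List (List Char)) :
    pvF (t :: ts) = (t ++ [' ']) ++ pvF ts := by
  simp [pvF]

theorem pvALoop_eq (use_eos : Int) (arr : List Int) : ∀ acc : List Char,
    pvALoop use_eos arr acc
      = acc ++ pvF (((pvSeg use_eos arr).filter (fun x => x != 1)).map PySem.Int.toChars) := by
  induction arr with
  | nil =>
    intro acc
    simp [pvALoop, pvSeg, pvF]
  | cons x rest ih =>
    intro acc
    by_cases hx0 : x = 0
    · subst hx0
      by_cases hu : use_eos = 0
      · subst hu
        simp [pvALoop, pvSeg, pvFirstZero, pvF]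
      · have hseg : pvSeg use_eos (0 :: rest) = [0] := by
          simp [pvSeg, pvFirstZero, hu]
        rw [hseg]
        simp [pvALoop, pvF, hu]
    · rw [pvSeg_cons use_eos x rest hx0]
      by_cases hx1 : x = 1
      · subst hx1
        rw [show pvALoop use_eos (1 :: rest) acc = pvALoop use_eos rest acc from by
          simp [pvALoop], ih]
        simp
      · rw [List.filter_cons_of_pos (by simp [hx1]), List.map_cons, pvF_cons]
        rw [show pvALoop use_eos (x :: rest) acc
              = pvALoop use_eos rest (acc ++ PySem.Int.toChars x ++ [' ']) from by
          simp [pvALoop, hx0, hx1], ih]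
        simp

theorem pvIsspace_digitChar : ∀ (m : Nat), PySem.Chars.isspace (Nat.digitChar m) = false
  | 0 | 1 | 2 | 3 | 4 | 5 | 6 | 7 | 8 | 9 | 10 | 11 | 12 | 13 | 14 | 15 => rfl
  | (_+16) => rfl

theorem pvToDigitsCore_forall (b f : Nat) : ∀ (n : Nat) (l : List Char),
    (∀ c ∈ l, PySem.Chars.isspace c = false) →
    ∀ c ∈ Nat.toDigitsCore b f n l, PySem.Chars.isspace c = false := by
  induction f with
  | zero => intro n l hl; simpa [Nat.toDigitsCore] using hl
  | succ f ih =>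
    intro n l hl c hc
    simp only [Nat.toDigitsCore] at hc
    by_cases h : n / b = 0
    · simp only [h, if_true] at hc
      rcases List.mem_cons.mp hc with hc | hc
      · subst hc; exact pvIsspace_digitChar _
      · exact hl c hc
    · simp only [h, ite_false] at hc
      refine ih (n / b) (Nat.digitChar (n % b) :: l) ?_ c hc
      intro d hd
      rcases List.mem_cons.mp hd with hd | hd
      · subst hd; exact pvIsspace_digitChar _
      · exact hl d hd

theorem pvToDigitsCore_ne_nil (b f n : Nat) (l : List Char) (hf : 0 < f) :
    Nat.toDigitsCore b f n l ≠ [] := by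
  cases f with
  | zero => omega
  | succ f =>
    simp only [Nat.toDigitsCore]
    by_cases h : n / b = 0
    · simp [h]
    · simp only [h, ite_false]
      -- the accumulator is nonempty from here on; result contains it
      have : ∀ (f' : Nat) (n' : Nat) (l' : List Char), l' ≠ [] → Nat.toDigitsCore b f' n' l' ≠ [] := by
        intro f'
        induction f' with
        | zero => intro n' l' h'; simpa [Nat.toDigitsCore] using h'
        | succ f' ih =>
          intro n' l' h'
          simp only [Nat.toDigitsCore]
          by_cases h2 : n' / b = 0
          · simp [h2]
          · simp only [h2, ite_false]
            exact ih _ _ (by simp)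
      exact this f (n / b) _ (by simp)

theorem pvToChars_ne_nil (n : Int) : PySem.Int.toChars n ≠ [] := by
  unfold PySem.Int.toChars
  split_ifs
  · simp
  · exact pvToDigitsCore_ne_nil 10 _ _ [] (by omega)

theorem pvToChars_no_space (n : Int) : ∀ c ∈ PySem.Int.toChars n, PySem.Chars.isspace c = false := by
  unfold PySem.Int.toChars Nat.toDigits
  split_ifs
  · intro c hc
    rcases List.mem_cons.mp hc with hc | hc
    · subst hc; decide
    · exact pvToDigitsCore_forall 10 _ _ [] (by simp) c hc
  · exact pvToDigitsCore_forall 10 _ _ [] (by simp)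

theorem pvLstrip_F (l : List Int) :
    PySem.Chars.lstrip (pvF (l.map PySem.Int.toChars)) = pvF (l.map PySem.Int.toChars) := by
  cases l with
  | nil => simp [pvF, PySem.Chars.lstrip]
  | cons x l =>
    simp only [pvF, List.map_cons, List.flatten_cons, PySem.Chars.lstrip]
    rcases h : PySem.Int.toChars x with _ | ⟨c, cs⟩
    · exact absurd h (pvToChars_ne_nil x)
    · have hc : PySem.Chars.isspace c = false := by
        apply pvToChars_no_space x; simp [h]
      simp [hc]

theorem pvRstrip_F (l : List Int) :
    PySem.Chars.rstrip (pvF (l.map PySem.Int.toChars))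
      = PySem.Chars.join [' '] (l.map PySem.Int.toChars) := by
  induction l with
  | nil => simp [pvF, PySem.Chars.rstrip, PySem.Chars.join_nil]
  | cons x l ih =>
    cases l with
    | nil =>
      simp only [pvF, List.map_cons, List.map_nil, List.flatten_cons, List.flatten_nil,
        List.append_nil, PySem.Chars.join_singleton, PySem.Chars.rstrip, List.reverse_append,
        List.reverse_singleton, List.singleton_append]
      rcases h : (PySem.Int.toChars x).reverse with _ | ⟨c, cs⟩
      · exact absurd (by simpa using congrArg List.reverse h) (pvToChars_ne_nil x)
      · have hc : PySem.Chars.isspace c = false := by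
          apply pvToChars_no_space x
          have hm : c ∈ (PySem.Int.toChars x).reverse := by simp [h]
          simpa using hm
        have h2 : cs.reverse ++ [c] = PySem.Int.toChars x := by
          simpa using congrArg List.reverse h.symm
        rw [List.dropWhile_cons, List.dropWhile_cons]
        simpa [hc, show PySem.Chars.isspace ' ' = true from by decide] using h2
    | cons y l' =>
      have hne : PySem.Chars.join [' '] ((y :: l').map PySem.Int.toChars) ≠ [] := by
        simp only [List.map_cons]
        cases l' with
        | nil => simpa [PySem.Chars.join_singleton] using pvToChars_ne_nil y
        | cons z l'' =>
          rw [List.map_cons, PySem.Chars.join_cons_cons]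
          rcases h : PySem.Int.toChars y with _ | ⟨c, cs⟩
          · exact absurd h (pvToChars_ne_nil y)
          · simp
      have hdw : List.dropWhile PySem.Chars.isspace (pvF ((y :: l').map PySem.Int.toChars)).reverse
            = (PySem.Chars.join [' '] ((y :: l').map PySem.Int.toChars)).reverse := by
        have := ih
        unfold PySem.Chars.rstrip at this
        have h2 := congrArg List.reverse this
        simpa using h2
      simp only [pvF, List.map_cons, List.flatten_cons, PySem.Chars.rstrip] at *
      rw [List.reverse_append, List.dropWhile_append, hdw]
      have hne' : (PySem.Chars.join [' '] ((PySem.Int.toChars y :: l'.map PySem.Int.toChars))).reverse ≠ [] := by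
        simpa using hne
      rw [if_neg (by simpa [List.isEmpty_iff] using hne')]
      rw [PySem.Chars.join_cons_cons]
      simp

theorem pvStrip_F (l : List Int) :
    PySem.Chars.strip (pvF (l.map PySem.Int.toChars))
      = PySem.Chars.join [' '] (l.map PySem.Int.toChars) := by
  unfold PySem.Chars.strip
  rw [pvLstrip_F, pvRstrip_F]

theorem pvSeg_eq_slice (arr : List Int) (use_eos : Int) :
    (if use_eos == 0 then PySem.List.slice arr none (some ((pvFirstZero arr : Int)))
     else PySem.List.slice arr none (some ((pvFirstZero arr : Int) + 1)))
      = pvSeg use_eos arr := by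
  unfold pvSeg
  by_cases hu : use_eos = 0
  · simp [hu, PySem.List.slice_to_natCast]
  · have hc : ((pvFirstZero arr : Int) + 1) = ((pvFirstZero arr + 1 : Nat) : Int) := by push_cast; ring
    have hbe : (use_eos == 0) = false := by simp [hu]
    rw [hbe]
    simp only [Bool.false_eq_true, if_false]
    rw [hc, PySem.List.slice_to_natCast]

-- ===== VERDICT (by name: the statement is the Claim_ definition above) =====
theorem array_to_str_spec : Claim_equal_array_to_str := by
  intro arr use_eos _
  unfold Spec_array_to_str array_to_str
  simp only [array_to_str_alt]
  apply String.toList_inj.mp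
  rw [pvSeg_eq_slice]
  rw [PySem.Str.toList_join]
  simp only [String.toList_ofList]
  rw [pvALoop_eq, List.nil_append, pvStrip_F]
  simp [Function.comp_def, PySem.Int.toList_toStr, List.map_map]
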